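-- pv_equiv track=rewrite | github.com/DataDog/datadog-agent | tasks/libs/ciproviders/gitlab_api.py | _get_combinated_variables
-- ===== SOURCE A (Python) =====
-- from itertools import product
--
-- def _get_combinated_variables(arg: dict[str, (str | list[str])]):
--     """Make combinations from the matrix arguments to obtain the list of variables that have each new job.
--
--     combinations({'key1': ['val1', 'val2'], 'key2': 'val3'}) -> [
--         {'key1': 'val1', 'key2': 'val3'},
--         {'key1': 'val2', 'key2': 'val3'}
--     ]
--
--     Returns:
--         A tuple of (1) the list of variable values and (2) the list of variable dictionaries
--     """
--
--     job_keys = []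
--     job_values = []
--     for key, values in arg.items():
--         if not isinstance(values, list):
--             values = [values]
--
--         job_keys.append([key] * len(values))
--         job_values.append(values)
--
--     # Product order is deterministic so each item in job_values will be associated with the same item in job_keys
--     job_keys = list(product(*job_keys))
--     job_values = list(product(*job_values))
--
--     job_vars = [dict(zip(k, v, strict=True)) for (k, v) in zip(job_keys, job_values, strict=True)]
--
--     return job_values, job_vars
-- ===== SOURCE B (Python) =====
-- def _get_combinated_variables(arg: dict[str, (str | list[str])]):
--     """Same result as A, by mixed-radix index arithmetic: the k-th combination
--     (in product's last-fastest order) is decoded from k by divmod instead of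
--     enumerating with itertools.product."""
--     keys = list(arg)
--     vals = [v if isinstance(v, list) else [v] for v in arg.values()]
--     total = 1
--     for v in vals:
--         total *= len(v)
--     job_values = []
--     job_vars = []
--     for i in range(total):
--         rem, tup = i, []
--         for v in reversed(vals):
--             rem, d = divmod(rem, len(v))
--             tup.append(v[d])
--         tup.reverse()
--         job_values.append(tuple(tup))
--         job_vars.append(dict(zip(keys, tup)))
--     return job_values, job_vars
-- ===== Notes on version B (the rewrite author's own statement) =====
-- stated objective: alternative
-- what changed: Replaces itertools.product enumeration (two parallel product calls over key/value lists, zipped back together) with mixed-radix index arithmetic: the k-th combination is decoded from the integer k by repeated divmod over the value-list lengths.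
import Mathlib
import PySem

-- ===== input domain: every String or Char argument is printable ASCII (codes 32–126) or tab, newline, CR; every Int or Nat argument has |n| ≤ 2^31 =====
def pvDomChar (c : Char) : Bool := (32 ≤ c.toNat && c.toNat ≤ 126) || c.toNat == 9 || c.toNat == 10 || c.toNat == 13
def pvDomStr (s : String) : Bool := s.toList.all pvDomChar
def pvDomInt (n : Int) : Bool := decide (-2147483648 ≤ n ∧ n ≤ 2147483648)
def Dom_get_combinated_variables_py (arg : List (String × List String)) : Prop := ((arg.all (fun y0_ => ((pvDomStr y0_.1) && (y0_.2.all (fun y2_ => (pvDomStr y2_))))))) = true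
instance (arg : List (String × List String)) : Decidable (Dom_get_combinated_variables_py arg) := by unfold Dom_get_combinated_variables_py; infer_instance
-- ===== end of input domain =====

-- B replaces A's itertools.product enumeration by mixed-radix index arithmetic:
-- the k-th combination is decoded from k by repeated divmod (objective: alternative).

-- ===== PORT A =====
-- itertools.product(*ls) as lists: rightmost factor varies fastest
def pyProduct {α : Type} (ls : List (List α)) : List (List α) :=
  ls.foldr (fun l acc => l.flatMap (fun x => acc.map (fun t => x :: t))) [[]]

-- Port of A. The `values` of the Lean input are always lists, so the
-- `isinstance` branch (wrapping a scalar) is dead here. `zip(..., strict=True)`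
-- is ported as List.zip: the zipped lists are products of per-key equal-length
-- lists, hence always of equal length, so `strict` can never raise.
def get_combinated_variables_py (arg : List (String × List String)) : List (List String) × (List (List (String × String))) :=
  let job_keys := arg.foldl (fun acc p => acc ++ [List.replicate p.2.length p.1]) []
  let job_values := arg.foldl (fun acc p => acc ++ [p.2]) []
  let job_keys := pyProduct job_keys
  let job_values := pyProduct job_values
  let job_vars := (List.zip job_keys job_values).map
    (fun kv => (PySem.Dict.ofList (List.zip kv.1 kv.2)).items)
  (job_values, job_vars)

-- ===== PORT B =====
-- the inner loop of Source B: `rem, tup = i, []; for v in reversed(vals): rem, d = divmod(rem, len(v)); tup.append(v[d]); tup.reverse()`.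
-- It only runs for i in range(total) with total > 0, so every len(v) > 0 there:
-- divmod never divides by zero and v[d] is always in range (the getD defaults are unreachable).
def pvDecode (vals : List (List String)) (i : Int) : List String :=
  let st := vals.reverse.foldl
    (fun (st : Int × List String) v =>
      (PySem.Int.floordiv st.1 (v.length : Int),
       st.2 ++ [PySem.List.pyGetD v (PySem.Int.mod st.1 (v.length : Int)) ""]))
    (i, [])
  st.2.reverse

def get_combinated_variables_py_alt (arg : List (String × List String)) : List (List String) × (List (List (String × String))) :=
  let keys := arg.map Prod.fst
  let vals := arg.map Prod.snd
  let total : Int := vals.foldl (fun t v => t * (v.length : Int)) 1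
  let rows := (PySem.List.pyRange 0 total 1).map (fun i =>
      let tup := pvDecode vals i
      (tup, (PySem.Dict.ofList (List.zip keys tup)).items))
  (rows.map Prod.fst, rows.map Prod.snd)

-- ===== PRECONDITION & SPEC =====
def Spec_get_combinated_variables_py (arg : List (String × List String)) (out : List (List String) × (List (List (String × String)))) : Prop := out = get_combinated_variables_py_alt arg
instance (arg : List (String × List String)) (out : List (List String) × (List (List (String × String)))) : Decidable (Spec_get_combinated_variables_py arg out) := by unfold Spec_get_combinated_variables_py; infer_instance

-- ===== CLAIM (what is proved, stated in full; the proofs are below) =====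
def Claim_equal_get_combinated_variables_py : Prop := ∀ (arg : List (String × List String)), Dom_get_combinated_variables_py arg → Spec_get_combinated_variables_py arg (get_combinated_variables_py arg)

-- ===== LEMMAS AND PROOFS =====

-- the product of per-key (key, value) pair lists: one entry per combination
def combos (arg : List (String × List String)) : List (List (String × String)) :=
  pyProduct (arg.map (fun p => p.2.map (fun v => (p.1, v))))

lemma combos_cons (k : String) (vs : List String) (arg : List (String × List String)) :
    combos ((k, vs) :: arg) =
      (vs.map (fun v => (k, v))).flatMap (fun x => (combos arg).map (fun t => x :: t)) := rfl

lemma pyProduct_cons {α : Type} (l : List α) (ls : List (List α)) :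
    pyProduct (l :: ls) = l.flatMap (fun x => (pyProduct ls).map (fun t => x :: t)) := rfl

lemma pyProduct_snd (arg : List (String × List String)) :
    pyProduct (arg.map (fun p => p.2)) = (combos arg).map (List.map Prod.snd) := by
  induction arg with
  | nil => rfl
  | cons p arg ih =>
    obtain ⟨k, vs⟩ := p
    rw [List.map_cons, pyProduct_cons, ih, combos_cons]
    simp [List.map_flatMap, List.flatMap_map, List.map_map, Function.comp_def]

lemma pyProduct_fst (arg : List (String × List String)) :
    pyProduct (arg.map (fun p => List.replicate p.2.length p.1)) =
      (combos arg).map (List.map Prod.fst) := by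
  induction arg with
  | nil => rfl
  | cons p arg ih =>
    obtain ⟨k, vs⟩ := p
    rw [List.map_cons, pyProduct_cons, ih, combos_cons]
    simp [List.map_map, Function.comp_def, List.flatMap_def, List.map_replicate,
      List.map_const']

lemma map_fst_combos (arg : List (String × List String)) :
    ∀ c ∈ combos arg, c.map Prod.fst = arg.map Prod.fst := by
  induction arg with
  | nil =>
    intro c hc
    simp [combos, pyProduct] at hc
    simp [hc]
  | cons p arg ih =>
    obtain ⟨k, vs⟩ := p
    intro c hc
    rw [combos_cons] at hc
    simp [List.mem_flatMap] at hc
    obtain ⟨v, _, t, ht, rfl⟩ := hc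
    simp [ih t ht]

lemma zip_fst_snd {α β : Type} (c : List (α × β)) :
    List.zip (c.map Prod.fst) (c.map Prod.snd) = c := by
  rw [List.zip_map']
  simp

-- A in closed form: values are pyProduct of the value lists, dicts are zip with the keys
lemma A_closed (arg : List (String × List String)) :
    get_combinated_variables_py arg =
      (pyProduct (arg.map Prod.snd),
       (pyProduct (arg.map Prod.snd)).map
         (fun tup => (PySem.Dict.ofList (List.zip (arg.map Prod.fst) tup)).items)) := by
  unfold get_combinated_variables_py
  simp only [PySem.List.foldl_append_singleton_eq_map, List.nil_append, pyProduct_fst,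
    pyProduct_snd, List.zip_map', List.map_map]
  refine Prod.ext rfl ?_
  apply List.map_congr_left
  intro c hc
  simp only [Function.comp_def]
  rw [← map_fst_combos arg c hc, zip_fst_snd]

-- reference decoder over Nat (proof-only)
def decN (vals : List (List String)) (i : Nat) : List String :=
  match vals with
  | [] => []
  | v :: vs =>
      v.getD (i / (vs.map List.length).prod) "" :: decN vs (i % (vs.map List.length).prod)

lemma foldl_mul_len (vals : List (List String)) :
    ∀ (a : Int), vals.foldl (fun t v => t * (v.length : Int)) a =
      a * ((vals.map List.length).prod : Nat) := by
  induction vals with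
  | nil => intro a; simp
  | cons v vs ih =>
    intro a
    rw [List.foldl_cons, ih, List.map_cons, List.prod_cons]
    push_cast
    ring

lemma range_mul_flatMap (l P : Nat) :
    List.range (l * P) =
      (List.range l).flatMap (fun d => (List.range P).map (fun j => d * P + j)) := by
  induction l with
  | zero => simp
  | succ l ih =>
    rw [Nat.succ_mul, List.range_add, ih, List.range_succ, List.flatMap_append]
    simp

lemma map_getD_range {α : Type} (xs : List α) (d : α) :
    (List.range xs.length).map (fun i => xs.getD i d) = xs := by
  apply List.ext_getElem
  · simp
  · intro i h1 h2; simp [List.getD, List.getElem?_eq_getElem h2]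

-- pyProduct enumerated by index: the k-th tuple is decN k
lemma pyProduct_eq_range_decN (vals : List (List String)) :
    pyProduct vals = (List.range ((vals.map List.length).prod)).map (decN vals) := by
  induction vals with
  | nil => simp [pyProduct, decN]
  | cons v vs ih =>
    rw [pyProduct_cons, ih]
    set P := ((vs.map List.length).prod) with hP
    rcases Nat.eq_zero_or_pos P with h0 | hpos
    · simp [← hP, h0]
    · rw [List.map_cons, List.prod_cons, range_mul_flatMap v.length P]
      conv_lhs => rw [← map_getD_range v ""]
      rw [List.flatMap_map, List.map_flatMap]
      apply List.flatMap_congr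
      intro d hd
      rw [List.map_map, List.map_map]
      apply List.map_congr_left
      intro j hj
      simp only [List.mem_range] at hd hj
      simp only [Function.comp_def, decN]
      have h1 : (d * P + j) / P = d := by
        rw [Nat.mul_comm, Nat.mul_add_div hpos, Nat.div_eq_of_lt hj]; omega
      have h2 : (d * P + j) % P = j := by
        rw [Nat.mul_comm, Nat.mul_add_mod, Nat.mod_eq_of_lt hj]
      rw [← hP, h1, h2]

-- decoding loop invariant: the foldr form of pvDecode computes (i / P, reversed decN (i % P))
lemma pvDecode_foldr (vals : List (List String)) :
    ∀ (i : Nat),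
      vals.foldr
        (fun v (st : Int × List String) =>
          (PySem.Int.floordiv st.1 (v.length : Int),
           st.2 ++ [PySem.List.pyGetD v (PySem.Int.mod st.1 (v.length : Int)) ""]))
        ((i : Int), []) =
        ((↑(i / (vals.map List.length).prod) : Int),
         (decN vals (i % (vals.map List.length).prod)).reverse) := by
  induction vals with
  | nil => intro i; simp [decN]
  | cons v vs ih =>
    intro i
    rw [List.foldr_cons, ih i]
    simp only [PySem.Int.floordiv_natCast, PySem.Int.mod_natCast, PySem.List.pyGetD_natCast,
      List.map_cons, List.prod_cons, decN]
    refine Prod.ext ?_ ?_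
    · simp [Nat.div_div_eq_div_mul, Nat.mul_comm]
    · simp only [List.reverse_cons]
      congr 1
      · congr 1
        rw [Nat.mod_mod_of_dvd _ ⟨v.length, Nat.mul_comm _ _⟩]
      · congr 1
        rw [Nat.mul_comm v.length, Nat.mod_mul_right_div_self]

lemma pvDecode_eq_decN (vals : List (List String)) (i : Nat)
    (hi : i < (vals.map List.length).prod) :
    pvDecode vals (i : Int) = decN vals i := by
  unfold pvDecode
  rw [List.foldl_reverse, pvDecode_foldr vals i, Nat.mod_eq_of_lt hi]
  simp

-- ===== VERDICT (by name: the statement is the Claim_ definition above) =====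
theorem get_combinated_variables_py_spec : Claim_equal_get_combinated_variables_py := by
  intro arg _
  show get_combinated_variables_py arg = get_combinated_variables_py_alt arg
  rw [A_closed]
  unfold get_combinated_variables_py_alt
  simp only []
  rw [foldl_mul_len, one_mul, PySem.List.pyRange_zero_nat, List.map_map, List.map_map,
    List.map_map, pyProduct_eq_range_decN]
  refine Prod.ext ?_ ?_ <;>
  · dsimp only
    simp only [List.map_map, Function.comp_def]
    apply List.map_congr_left
    intro k hk
    simp only [List.mem_range] at hk
    rw [pvDecode_eq_decN _ k (by simpa [List.map_map, Function.comp_def] using hk)]
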